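-- pv_equiv track=rewrite | github.com/kuznetsovvj/education | algorithms/codeforces/1714a.py | check
-- ===== SOURCE A (Python) =====
-- def check(current, times):
--     times.sort()
--     for time in times:
--         if current < time:
--             return check_different(current, time)
--         if current == time:
--             return "0 0"
--     return check_more(current, times[0])
--
-- def check_different(current, time):
--     delta = time - current
--     return f"{delta // 60} {delta % 60}"
--
-- def check_more(current, time):
--     delta = time + (1440 - current)
--     return f"{delta // 60} {delta % 60}"
-- ===== SOURCE B (Python) =====
-- def check(current, times):
--     times.sort()
--     lo, hi = 0, len(times)
--     while lo < hi:
--         mid = (lo + hi) // 2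
--         if times[mid] < current:
--             lo = mid + 1
--         else:
--             hi = mid
--     if lo < len(times):
--         delta = times[lo] - current
--     else:
--         delta = times[0] + 1440 - current
--     return f"{delta // 60} {delta % 60}"
-- ===== Notes on version B (the rewrite author's own statement) =====
-- stated objective: alternative
-- what changed: Replaces the linear scan for the first element >= current (with its separate '== current' special case and two formatting helpers) by a binary search over the sorted list; the equal case falls out as delta == 0.
import Mathlib
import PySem

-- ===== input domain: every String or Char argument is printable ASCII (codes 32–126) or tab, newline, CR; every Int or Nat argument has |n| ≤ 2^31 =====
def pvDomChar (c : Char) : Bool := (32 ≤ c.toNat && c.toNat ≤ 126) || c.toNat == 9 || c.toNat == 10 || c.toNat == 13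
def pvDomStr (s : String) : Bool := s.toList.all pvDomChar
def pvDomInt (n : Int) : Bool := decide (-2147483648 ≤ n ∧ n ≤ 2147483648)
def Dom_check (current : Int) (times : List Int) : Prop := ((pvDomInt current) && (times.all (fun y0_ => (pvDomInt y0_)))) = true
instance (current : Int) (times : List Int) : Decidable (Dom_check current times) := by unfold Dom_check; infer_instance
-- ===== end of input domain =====

-- B replaces A's linear first->=current scan (with its '== current' special case and two
-- formatting helpers) by a hand-written binary search over the sorted list; equivalence is about
-- the RETURN value — both Pythons also sort `times` in place.

-- ===== PORT A =====
def check_different (current time : Int) : String :=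
  let delta := time - current
  PySem.Int.toStr (PySem.Int.floordiv delta 60) ++ " " ++ PySem.Int.toStr (PySem.Int.mod delta 60)

def check_more (current time : Int) : String :=
  let delta := time + (1440 - current)
  PySem.Int.toStr (PySem.Int.floordiv delta 60) ++ " " ++ PySem.Int.toStr (PySem.Int.mod delta 60)

-- the for-loop over the sorted list; none = the loop fell through
def checkLoop (current : Int) : List Int → Option String
  | [] => none
  | t :: ts =>
    if current < t then some (check_different current t)
    else if current = t then some "0 0"
    else checkLoop current ts

def check (current : Int) (times : List Int) : String :=
  let ts := PySem.List.sorted times (fun x => x) false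
  match checkLoop current ts with
  | some s => s
  | none =>
    match PySem.List.pyGet? ts 0 with   -- times[0]: IndexError on [] (excluded by Pre_check)
    | some t => check_more current t
    | none => ""

-- ===== PORT B =====
-- the while-loop of Source B: lo/hi binary search; the index mid is in range whenever
-- lo < hi ≤ xs.length, so getD is exact there
def bsearch (xs : List Int) (x : Int) (lo hi : Nat) : Nat :=
  if h : lo < hi then
    let mid := (lo + hi) / 2
    if xs.getD mid 0 < x then bsearch xs x (mid + 1) hi else bsearch xs x lo mid
  else lo
termination_by hi - lo
decreasing_by all_goals omega

def check_alt (current : Int) (times : List Int) : String :=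
  let ts := PySem.List.sorted times (fun x => x) false
  let lo := bsearch ts current 0 ts.length
  let delta :=
    if lo < ts.length then ts.getD lo 0 - current
    else (match PySem.List.pyGet? ts 0 with | some t => t | none => 0) + 1440 - current
  PySem.Int.toStr (PySem.Int.floordiv delta 60) ++ " " ++ PySem.Int.toStr (PySem.Int.mod delta 60)

-- ===== PRECONDITION & SPEC =====
-- Pre_ excludes only the empty list, on which A raises IndexError (times[0]); B raises there too.
def Pre_check (current : Int) (times : List Int) : Prop := times ≠ []
instance (current : Int) (times : List Int) : Decidable (Pre_check current times) := by
  unfold Pre_check; infer_instance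

def pvWitness_check : Int × List Int := (100, [30, 500, 90])

def Spec_check (current : Int) (times : List Int) (out : String) : Prop := out = check_alt current times
instance (current : Int) (times : List Int) (out : String) : Decidable (Spec_check current times out) := by
  unfold Spec_check; infer_instance

-- ===== CLAIM (what is proved, stated in full; the proofs are below) =====
def Claim_equal_check : Prop := ∀ (current : Int) (times : List Int), Dom_check current times → Pre_check current times → Spec_check current times (check current times)

-- ===== LEMMAS AND PROOFS =====

def fmt (delta : Int) : String :=
  PySem.Int.toStr (PySem.Int.floordiv delta 60) ++ " " ++ PySem.Int.toStr (PySem.Int.mod delta 60)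

theorem fmt_zero : fmt 0 = "0 0" := by decide

-- A's loop drops the strict prefix of elements < current and formats the head (0 when equal)
theorem checkLoop_eq_dropWhile (current : Int) (ts : List Int) :
    checkLoop current ts =
      match ts.dropWhile (fun t => decide (t < current)) with
      | [] => none
      | t :: _ => some (fmt (t - current)) := by
  induction ts with
  | nil => rfl
  | cons t ts ih =>
    rcases lt_trichotomy current t with h | h | h
    · simp [checkLoop, h, List.dropWhile, show ¬ t < current by omega, fmt, check_different]
    · subst h
      simp [checkLoop, List.dropWhile]
      exact fmt_zero.symm
    · simpa [checkLoop, List.dropWhile, h, show ¬ current < t by omega,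
        show current ≠ t by omega] using ih

-- binary-search correctness: if k splits the list into a (< x) prefix and a (not < x) suffix,
-- any bracketing search converges to k
theorem bsearch_eq (xs : List Int) (x : Int) (k : Nat)
    (H1 : ∀ i, i < k → i < xs.length → xs.getD i 0 < x)
    (H2 : ∀ i, k ≤ i → i < xs.length → ¬ xs.getD i 0 < x)
    (lo hi : Nat) (hlk : lo ≤ k) (hkh : k ≤ hi) (hhl : hi ≤ xs.length) :
    bsearch xs x lo hi = k := by
  unfold bsearch
  by_cases h : lo < hi
  · simp only [h, dif_pos]
    by_cases hlt : xs.getD ((lo + hi) / 2) 0 < x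
    · have hmk : (lo + hi) / 2 < k := by
        by_contra hc
        exact H2 _ (by omega) (by omega) hlt
      simp only [hlt, if_pos]
      exact bsearch_eq xs x k H1 H2 _ hi (by omega) hkh hhl
    · have hmk : k ≤ (lo + hi) / 2 := by
        by_contra hc
        exact hlt (H1 _ (by omega) (by omega))
      simp only [hlt, if_false]
      exact bsearch_eq xs x k H1 H2 lo _ hlk hmk (by omega)
  · simp only [h, dif_neg, not_false_iff]
    omega
termination_by hi - lo
decreasing_by all_goals omega

-- a sorted list splits at some k: strict (< x) prefix, (not < x) suffix, and the dropWhile is drop k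
theorem sorted_split (x : Int) (ts : List Int) (hs : ts.Pairwise (fun a b => a ≤ b)) :
    ∃ k, k ≤ ts.length ∧
      (∀ i, i < k → i < ts.length → ts.getD i 0 < x) ∧
      (∀ i, k ≤ i → i < ts.length → ¬ ts.getD i 0 < x) ∧
      ts.dropWhile (fun t => decide (t < x)) = ts.drop k := by
  induction ts with
  | nil => exact ⟨0, by simp⟩
  | cons t ts ih =>
    rcases List.pairwise_cons.mp hs with ⟨hhead, htail⟩
    by_cases h : t < x
    · rcases ih htail with ⟨k, hk, HA1, HA2, Hdw⟩
      refine ⟨k + 1, by simpa using hk, ?_, ?_, ?_⟩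
      · intro i hik hil
        cases i with
        | zero => simpa using h
        | succ j => exact HA1 j (by omega) (by simpa using hil)
      · intro i hki hil
        cases i with
        | zero => omega
        | succ j => exact HA2 j (by omega) (by simpa using hil)
      · simpa [List.dropWhile, h] using Hdw
    · refine ⟨0, by simp, by intro i hi _; exact absurd hi (Nat.not_lt_zero i), ?_,
        by simp [List.dropWhile, h]⟩
      intro i _ hil
      cases i with
      | zero => simpa using h
      | succ j =>
        have hjl : j < ts.length := by simpa using hil
        have hm : ts.getD j 0 ∈ ts := by
          rw [List.getD_eq_getElem ts 0 hjl]; exact List.getElem_mem hjl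
        have := hhead _ hm
        simp only [List.getD_cons_succ]
        omega

-- ===== VERDICT (by name: the statement is the Claim_ definition above) =====
theorem check_spec : Claim_equal_check := by
  intro current times _ hpre
  show check current times = check_alt current times
  unfold check check_alt
  have hne : PySem.List.sorted times (fun x => x) false ≠ [] := by
    rw [Ne, PySem.List.sorted_eq_nil_iff]; exact hpre
  have hs : (PySem.List.sorted times (fun x => x) false).Pairwise (fun a b => a ≤ b) := by
    simpa using PySem.List.sorted_pairwise times (fun x => x)
  generalize PySem.List.sorted times (fun x => x) false = ts at hne hs ⊢
  rcases sorted_split current ts hs with ⟨k, hk, H1, H2, Hdw⟩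
  have hb : bsearch ts current 0 ts.length = k :=
    bsearch_eq ts current k H1 H2 0 ts.length (Nat.zero_le _) hk le_rfl
  simp only [checkLoop_eq_dropWhile, Hdw, hb]
  by_cases hkl : k < ts.length
  · rw [List.drop_eq_getElem_cons hkl]
    simp only [hkl, if_pos, List.getD_eq_getElem ts 0 hkl]
    rfl
  · have hkeq : k = ts.length := by omega
    rw [hkeq, List.drop_length]
    obtain ⟨h, tl, rfl⟩ := List.exists_cons_of_ne_nil hne
    simp only [PySem.List.pyGet?_zero_cons, lt_irrefl, if_false]
    simp only [check_more]
    rw [show (h + (1440 - current) : Int) = h + 1440 - current by ring]
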